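-- pv_equiv track=rewrite | github.com/DajiaLi/ComputerArchitectureProject | project1/MIPSsimulator.py | complement2source
-- ===== SOURCE A (Python) =====
-- def complement2source(comlement):
--     res = list(comlement)
--     first1 = False
--     for i in range(len(comlement) - 1, -1, -1):
--         if first1:
--             if res[i] == '1':
--                 res[i] = '0'
--             else:
--                 res[i] = '1'
--         else:
--             if res[i] == '1':
--                 first1 = True
--     return "".join(res)
-- ===== SOURCE B (Python) =====
-- def complement2source(comlement):
--     idx = comlement.rfind('1')
--     if idx == -1:
--         return comlement
--     return ''.join('0' if c == '1' else '1' for c in comlement[:idx]) + comlement[idx:]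
-- ===== Notes on version B (the rewrite author's own statement) =====
-- stated objective: simpler
-- what changed: Replaces the stateful right-to-left scan with a mutable seen-a-one flag by first locating the pivot with str.rfind and then flipping only the prefix before it in one comprehension, keeping the suffix untouched.
import Mathlib
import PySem

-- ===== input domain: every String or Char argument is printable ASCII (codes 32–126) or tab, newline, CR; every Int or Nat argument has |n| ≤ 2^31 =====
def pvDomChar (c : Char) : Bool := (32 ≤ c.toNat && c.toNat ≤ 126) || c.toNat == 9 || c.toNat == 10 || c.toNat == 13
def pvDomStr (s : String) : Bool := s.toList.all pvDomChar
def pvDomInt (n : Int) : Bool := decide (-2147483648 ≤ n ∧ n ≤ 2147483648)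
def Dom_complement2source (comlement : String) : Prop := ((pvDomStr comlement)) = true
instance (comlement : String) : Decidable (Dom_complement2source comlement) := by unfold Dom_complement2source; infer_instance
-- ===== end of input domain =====

-- B replaces A's stateful right-to-left scan by locate-the-last-'1' then flip-the-prefix (simpler decomposition).

-- ===== PORT A =====
-- A scans indices from right to left carrying the flag `first1`; processing index i after
-- all indices to its right equals this structural recursion where the tail is handled first.
def pvGoA : List Char → List Char × Bool
  | [] => ([], false)
  | c :: rest =>
    let (rest', f) := pvGoA rest
    if f then
      (if c = '1' then ('0' :: rest', f) else ('1' :: rest', f))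
    else
      if c = '1' then (c :: rest', true) else (c :: rest', f)

def complement2source (comlement : String) : String :=
  String.ofList (pvGoA comlement.toList).1

-- ===== PORT B =====
-- Source B's comlement.rfind('1'): index of the last '1', none if absent.
def pvRfind1 : List Char → Option Nat
  | [] => none
  | c :: rest =>
    match pvRfind1 rest with
    | some k => some (k + 1)
    | none => if c = '1' then some 0 else none

def pvFlip (c : Char) : Char := if c = '1' then '0' else '1'

def complement2source_alt (comlement : String) : String :=
  match pvRfind1 comlement.toList with
  | none => comlement
  | some k => String.ofList ((comlement.toList.take k).map pvFlip ++ comlement.toList.drop k)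

-- ===== PRECONDITION & SPEC =====
def Spec_complement2source (comlement : String) (out : String) : Prop := out = complement2source_alt comlement
instance (comlement : String) (out : String) : Decidable (Spec_complement2source comlement out) := by unfold Spec_complement2source; infer_instance

-- ===== CLAIM (what is proved, stated in full; the proofs are below) =====
def Claim_equal_complement2source : Prop := ∀ (comlement : String), Dom_complement2source comlement → Spec_complement2source comlement (complement2source comlement)

-- ===== LEMMAS AND PROOFS =====
theorem pvGoA_eq (cs : List Char) :
    pvGoA cs = ((match pvRfind1 cs with
                 | none => cs
                 | some k => (cs.take k).map pvFlip ++ cs.drop k),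
                (pvRfind1 cs).isSome) := by
  induction cs with
  | nil => simp [pvGoA, pvRfind1]
  | cons c rest ih =>
    simp only [pvGoA, pvRfind1, ih]
    cases h : pvRfind1 rest with
    | none =>
      by_cases hc : c = '1' <;> simp [hc]
    | some k =>
      by_cases hc : c = '1' <;> simp [hc, pvFlip]

-- ===== VERDICT (by name: the statement is the Claim_ definition above) =====
theorem complement2source_spec : Claim_equal_complement2source := by
  intro s _
  unfold Spec_complement2source complement2source complement2source_alt
  rw [pvGoA_eq]
  cases h : pvRfind1 s.toList with
  | none => exact String.ofList_toList
  | some k => rfl
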